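-- pv_equiv track=rewrite | github.com/rubencr14/foldfit | src/foldfit/infrastructure/data/msa_provider.py | _parse_a3m_to_lists
-- ===== SOURCE A (Python) =====
-- def _parse_a3m_to_lists(content: str) -> tuple[list[str], list[list[int]]]:
--     """Parse A3M content into sequence and deletion lists."""
--     sequences: list[str] = []
--     deletion_matrices: list[list[int]] = []
--     current_seq = ""
--
--     for line in content.split("\n"):
--         line = line.strip()
--         if not line or line.startswith("#"):
--             continue
--         if line.startswith(">"):
--             if current_seq:
--                 seq, dels = _process_a3m_sequence(current_seq)
--                 sequences.append(seq)
--                 deletion_matrices.append(dels)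
--             current_seq = ""
--         else:
--             current_seq += line
--
--     if current_seq:
--         seq, dels = _process_a3m_sequence(current_seq)
--         sequences.append(seq)
--         deletion_matrices.append(dels)
--
--     return sequences, deletion_matrices
--
-- def _process_a3m_sequence(raw: str) -> tuple[str, list[int]]:
--     """Process an A3M sequence into aligned sequence and deletion counts."""
--     sequence = ""
--     deletions: list[int] = []
--     del_count = 0
--
--     for char in raw:
--         if char.islower():
--             del_count += 1
--         elif char != "\n":
--             sequence += char.upper()
--             deletions.append(del_count)
--             del_count = 0
--
--     return sequence, deletions
-- ===== SOURCE B (Python) =====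
-- def _parse_a3m_to_lists(content: str) -> tuple[list[str], list[list[int]]]:
--     """Single streaming pass: no intermediate concatenated string, no re-scan helper."""
--     sequences: list[str] = []
--     deletion_matrices: list[list[int]] = []
--     seq_chars: list[str] = []
--     dels: list[int] = []
--     del_count = 0
--     seen = False  # any body character since the last header?
--
--     for line in content.split("\n"):
--         line = line.strip()
--         if not line or line.startswith("#"):
--             continue
--         if line.startswith(">"):
--             if seen:
--                 sequences.append("".join(seq_chars))
--                 deletion_matrices.append(dels)
--             seq_chars, dels, del_count, seen = [], [], 0, False
--         else:
--             for ch in line: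
--                 seen = True
--                 if ch.islower():
--                     del_count += 1
--                 elif ch != "\n":
--                     seq_chars.append(ch.upper())
--                     dels.append(del_count)
--                     del_count = 0
--
--     if seen:
--         sequences.append("".join(seq_chars))
--         deletion_matrices.append(dels)
--     return sequences, deletion_matrices
-- ===== Notes on version B (the rewrite author's own statement) =====
-- stated objective: alternative
-- what changed: Fuses A's two phases (accumulate a concatenated per-record string, then re-scan it with a helper) into one streaming pass that processes each body character as it is read, with a 'seen a body character since the last header' flag deciding the flush; sequences are built as char lists joined once instead of an intermediate string that is scanned again.
import Mathlib
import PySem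

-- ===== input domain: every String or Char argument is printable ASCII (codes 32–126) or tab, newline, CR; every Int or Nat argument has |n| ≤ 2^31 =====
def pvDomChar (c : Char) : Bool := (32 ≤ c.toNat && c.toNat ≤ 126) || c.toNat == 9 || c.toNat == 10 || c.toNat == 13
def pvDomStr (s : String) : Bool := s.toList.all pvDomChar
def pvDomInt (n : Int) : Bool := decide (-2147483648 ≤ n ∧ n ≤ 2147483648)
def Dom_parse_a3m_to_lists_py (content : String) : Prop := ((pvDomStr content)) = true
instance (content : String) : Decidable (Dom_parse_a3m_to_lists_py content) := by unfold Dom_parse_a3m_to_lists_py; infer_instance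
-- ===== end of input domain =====

-- B fuses A's accumulate-then-rescan phases into one streaming pass over body characters (objective: alternative decomposition, same cost).

-- ===== PORT A =====

-- _process_a3m_sequence's loop over the characters of raw (sequence kept as List Char, joined to String at use site)
def a3mCharStepA (st : List Char × List Int × Int) (c : Char) : List Char × List Int × Int :=
  if PySem.Chars.islower c then (st.1, st.2.1, st.2.2 + 1)
  else if c ≠ '\n' then (st.1 ++ [PySem.Chars.upperChar c], st.2.1 ++ [st.2.2], 0)
  else st

-- _process_a3m_sequence
def procA3M (raw : List Char) : List Char × List Int :=
  let st := raw.foldl a3mCharStepA ([], [], 0)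
  (st.1, st.2.1)

structure AState where
  seqs : List String
  mats : List (List Int)
  cur  : List Char
deriving Repr

-- body of A's `for line in content.split("\n")`
def aLineStep (st : AState) (rawline : List Char) : AState :=
  let line := PySem.Chars.strip rawline
  if line.isEmpty || PySem.Chars.startswith line ['#'] then st
  else if PySem.Chars.startswith line ['>'] then
    (if st.cur.isEmpty then ⟨st.seqs, st.mats, []⟩
     else
       let p := procA3M st.cur
       ⟨st.seqs ++ [String.ofList p.1], st.mats ++ [p.2], []⟩)
  else ⟨st.seqs, st.mats, st.cur ++ line⟩

def parse_a3m_to_lists_py (content : String) : List String × List (List Int) :=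
  let st := (PySem.Chars.splitOn content.toList ['\n']).foldl aLineStep ⟨[], [], []⟩
  if st.cur.isEmpty then (st.seqs, st.mats)
  else
    let p := procA3M st.cur
    (st.seqs ++ [String.ofList p.1], st.mats ++ [p.2])

-- ===== PORT B =====

structure BState where
  seqs : List String
  mats : List (List Int)
  chs  : List Char
  ds   : List Int
  dc   : Int
  seen : Bool
deriving Repr

-- body of B's inner `for ch in line`
def bCharStep (st : BState) (c : Char) : BState :=
  let st := { st with seen := true }
  if PySem.Chars.islower c then { st with dc := st.dc + 1 }
  else if c ≠ '\n' then { st with chs := st.chs ++ [PySem.Chars.upperChar c], ds := st.ds ++ [st.dc], dc := 0 }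
  else st

-- body of B's `for line in content.split("\n")`
def bLineStep (st : BState) (rawline : List Char) : BState :=
  let line := PySem.Chars.strip rawline
  if line.isEmpty || PySem.Chars.startswith line ['#'] then st
  else if PySem.Chars.startswith line ['>'] then
    (if st.seen then ⟨st.seqs ++ [String.ofList st.chs], st.mats ++ [st.ds], [], [], 0, false⟩
     else ⟨st.seqs, st.mats, [], [], 0, false⟩)
  else line.foldl bCharStep st

def parse_a3m_to_lists_py_alt (content : String) : List String × List (List Int) :=
  let st := (PySem.Chars.splitOn content.toList ['\n']).foldl bLineStep ⟨[], [], [], [], 0, false⟩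
  if st.seen then (st.seqs ++ [String.ofList st.chs], st.mats ++ [st.ds])
  else (st.seqs, st.mats)

-- ===== PRECONDITION & SPEC =====
def Spec_parse_a3m_to_lists_py (content : String) (out : List String × List (List Int)) : Prop := out = parse_a3m_to_lists_py_alt content
instance (content : String) (out : List String × List (List Int)) : Decidable (Spec_parse_a3m_to_lists_py content out) := by unfold Spec_parse_a3m_to_lists_py; infer_instance

-- ===== CLAIM (what is proved, stated in full; the proofs are below) =====
def Claim_equal_parse_a3m_to_lists_py : Prop := ∀ (content : String), Dom_parse_a3m_to_lists_py content → Spec_parse_a3m_to_lists_py content (parse_a3m_to_lists_py content)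

-- ===== LEMMAS AND PROOFS =====

-- the simulation relation between A's and B's loop states
def StRel (a : AState) (b : BState) : Prop :=
  b.seqs = a.seqs ∧ b.mats = a.mats ∧
  a.cur.foldl a3mCharStepA ([], [], 0) = (b.chs, b.ds, b.dc) ∧
  b.seen = !a.cur.isEmpty

-- B's inner char loop computes exactly A's helper fold, and sets seen iff the line had a char
theorem foldl_bCharStep (l : List Char) : ∀ (st : BState),
    l.foldl bCharStep st =
      ⟨st.seqs, st.mats,
       (l.foldl a3mCharStepA (st.chs, st.ds, st.dc)).1,
       (l.foldl a3mCharStepA (st.chs, st.ds, st.dc)).2.1,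
       (l.foldl a3mCharStepA (st.chs, st.ds, st.dc)).2.2,
       st.seen || !l.isEmpty⟩ := by
  induction l with
  | nil => intro st; simp
  | cons c l ih =>
    intro st
    have hb : bCharStep st c =
        ⟨st.seqs, st.mats,
         (a3mCharStepA (st.chs, st.ds, st.dc) c).1,
         (a3mCharStepA (st.chs, st.ds, st.dc) c).2.1,
         (a3mCharStepA (st.chs, st.ds, st.dc) c).2.2, true⟩ := by
      simp only [bCharStep, a3mCharStepA]
      split_ifs <;> rfl
    simp only [List.foldl_cons, ih, hb, Prod.mk.eta, List.isEmpty_cons, Bool.not_false, Bool.or_true, Bool.true_or]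

-- one line preserves the simulation
theorem stRel_step (a : AState) (b : BState) (h : StRel a b) (rawline : List Char) :
    StRel (aLineStep a rawline) (bLineStep b rawline) := by
  obtain ⟨h1, h2, h3, h4⟩ := h
  simp only [aLineStep, bLineStep]
  by_cases hskip : ((PySem.Chars.strip rawline).isEmpty || PySem.Chars.startswith (PySem.Chars.strip rawline) ['#']) = true
  · rw [if_pos hskip, if_pos hskip]; exact ⟨h1, h2, h3, h4⟩
  · rw [if_neg hskip, if_neg hskip]
    by_cases hhdr : PySem.Chars.startswith (PySem.Chars.strip rawline) ['>'] = true
    · rw [if_pos hhdr, if_pos hhdr]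
      by_cases hc : a.cur.isEmpty = true
      · have hsn : b.seen = false := by simp [h4, hc]
        rw [if_pos hc, if_neg (by simp [hsn])]
        exact ⟨h1, h2, rfl, rfl⟩
      · have hce : a.cur.isEmpty = false := by revert hc; cases a.cur.isEmpty <;> simp
        have hsn : b.seen = true := by simp [h4, hce]
        rw [if_neg hc, if_pos hsn]
        refine ⟨?_, ?_, rfl, rfl⟩
        · simp [h1, procA3M, h3]
        · simp [h2, procA3M, h3]
    · rw [if_neg hhdr, if_neg hhdr]
      have hne : (PySem.Chars.strip rawline).isEmpty = false := by
        revert hskip; cases (PySem.Chars.strip rawline).isEmpty <;> simp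
      rw [foldl_bCharStep]
      refine ⟨h1, h2, ?_, ?_⟩
      · simp [List.foldl_append, h3]
      · have hs' : PySem.Chars.strip rawline ≠ [] := by simpa using hne
        simp [h4, hne, hs']

theorem stRel_foldl (lines : List (List Char)) : ∀ (a : AState) (b : BState), StRel a b →
    StRel (lines.foldl aLineStep a) (lines.foldl bLineStep b) := by
  induction lines with
  | nil => intro a b h; exact h
  | cons l ls ih => intro a b h; exact ih _ _ (stRel_step a b h l)

-- ===== VERDICT (by name: the statement is the Claim_ definition above) =====
theorem parse_a3m_to_lists_py_spec : Claim_equal_parse_a3m_to_lists_py := by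
  intro content _
  unfold Spec_parse_a3m_to_lists_py parse_a3m_to_lists_py parse_a3m_to_lists_py_alt
  obtain ⟨h1, h2, h3, h4⟩ := stRel_foldl (PySem.Chars.splitOn content.toList ['\n'])
      ⟨[], [], []⟩ ⟨[], [], [], [], 0, false⟩ ⟨rfl, rfl, rfl, rfl⟩
  set a := (PySem.Chars.splitOn content.toList ['\n']).foldl aLineStep ⟨[], [], []⟩
  set b := (PySem.Chars.splitOn content.toList ['\n']).foldl bLineStep ⟨[], [], [], [], 0, false⟩
  by_cases hc : a.cur.isEmpty = true
  · have hsn : b.seen = false := by simp [h4, hc]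
    rw [if_pos hc, if_neg (by simp [hsn])]
    rw [h1, h2]
  · have hce : a.cur.isEmpty = false := by revert hc; cases a.cur.isEmpty <;> simp
    have hsn : b.seen = true := by simp [h4, hce]
    rw [if_neg hc, if_pos hsn]
    simp [h1, h2, procA3M, h3]
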